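-- pv_equiv track=rewrite | github.com/token-enjoyers/biontech-hackathon | src/Medical_Wizard_MCP/tools/_responses.py | _unique_sources
-- ===== SOURCE A (Python) =====
-- from typing import Any
--
-- def _unique_sources(items: list[dict[str, Any]]) -> list[str]:
--     return sorted(
--         {
--             item.get("source")
--             for item in items
--             if isinstance(item, dict) and isinstance(item.get("source"), str) and item["source"]
--         }
--     )
-- ===== SOURCE B (Python) =====
-- def _unique_sources(items):
--     vals = []
--     for item in items:
--         if isinstance(item, dict):
--             s = item.get("source")
--             if isinstance(s, str) and s:
--                 vals.append(s)
--     vals.sort()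
--     out = []
--     prev = None
--     for s in vals:
--         if s != prev:
--             out.append(s)
--             prev = s
--     return out
-- ===== Notes on version B (the rewrite author's own statement) =====
-- stated objective: alternative
-- what changed: Replaces the set-comprehension-then-sort with collecting valid sources into a plain list, sorting it, and a single adjacent-dedup pass with a 'prev' accumulator (no hash set).
import Mathlib
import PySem

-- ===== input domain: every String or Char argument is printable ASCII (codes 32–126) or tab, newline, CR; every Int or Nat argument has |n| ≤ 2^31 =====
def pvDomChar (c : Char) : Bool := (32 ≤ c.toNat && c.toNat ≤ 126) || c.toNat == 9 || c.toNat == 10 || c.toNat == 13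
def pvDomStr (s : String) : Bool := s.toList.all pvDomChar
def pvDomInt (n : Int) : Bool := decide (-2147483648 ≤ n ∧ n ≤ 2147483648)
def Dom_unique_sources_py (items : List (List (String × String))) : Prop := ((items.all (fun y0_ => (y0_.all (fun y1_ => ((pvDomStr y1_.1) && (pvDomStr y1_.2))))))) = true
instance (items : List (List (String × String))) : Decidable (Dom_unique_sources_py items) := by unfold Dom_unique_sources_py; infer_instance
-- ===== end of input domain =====

-- B replaces A's set-comprehension-then-sort by list-collect, sort, and an adjacent-dedup pass with a 'prev' accumulator (alternative decomposition, no hash set).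

-- ===== PORT A =====
-- item.get("source") on a string-valued dict; the isinstance guards hold on the typed
-- domain except that a missing key yields None (not a str) — hence the Option match.
def pvGuardA (item : List (String × String)) : Option String :=
  match (PySem.Dict.mk item).get? "source" with
  | some s => if s ≠ "" then some s else none
  | none => none

-- sorted({item.get("source") for item in items if ...})
def unique_sources_py (items : List (List (String × String))) : List String :=
  PySem.List.sorted (PySem.Set.ofList (items.filterMap pvGuardA)) (fun x => x) false

-- ===== PORT B =====
-- first loop of Source B: vals.append(s) for each valid source
def pvCollectB (items : List (List (String × String))) : List String :=
  items.foldl (fun vals item =>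
    match (PySem.Dict.mk item).get? "source" with
    | some s => if s ≠ "" then vals ++ [s] else vals
    | none => vals) []

-- vals.sort(); then the adjacent-dedup pass carrying (out, prev)
def unique_sources_py_alt (items : List (List (String × String))) : List String :=
  let vals := PySem.List.sorted (pvCollectB items) (fun x => x) false
  (vals.foldl (fun p s => if p.2 ≠ some s then (p.1 ++ [s], some s) else p)
    (([] : List String), (none : Option String))).1

-- ===== PRECONDITION & SPEC =====
def Spec_unique_sources_py (items : List (List (String × String))) (out : List String) : Prop := out = unique_sources_py_alt items
instance (items : List (List (String × String))) (out : List String) : Decidable (Spec_unique_sources_py items out) := by unfold Spec_unique_sources_py; infer_instance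

-- ===== CLAIM (what is proved, stated in full; the proofs are below) =====
def Claim_equal_unique_sources_py : Prop := ∀ (items : List (List (String × String))), Dom_unique_sources_py items → Spec_unique_sources_py items (unique_sources_py items)

-- ===== LEMMAS AND PROOFS =====
lemma collectB_eq (items : List (List (String × String))) :
    pvCollectB items = items.filterMap pvGuardA := by
  have h : ∀ (l : List (List (String × String))) (acc : List String),
      l.foldl (fun vals item =>
        match (PySem.Dict.mk item).get? "source" with
        | some s => if s ≠ "" then vals ++ [s] else vals
        | none => vals) acc = acc ++ l.filterMap pvGuardA := by
    intro l
    induction l with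
    | nil => simp
    | cons x xs ih =>
      intro acc
      have hstep : (match (PySem.Dict.mk x).get? "source" with
        | some s => if s ≠ "" then acc ++ [s] else acc
        | none => acc) = acc ++ (pvGuardA x).toList := by
        unfold pvGuardA
        cases hx : (PySem.Dict.mk x).get? "source" with
        | none => simp
        | some s => by_cases hs : s = "" <;> simp [hs]
      rw [List.foldl_cons]
      rw [hstep]
      rw [ih, List.filterMap_cons]
      cases pvGuardA x <;> simp
  simpa [pvCollectB] using h items []

def pvAdj : Option String → List String → List String
  | _, [] => []
  | prev, s :: rest =>
    if prev ≠ some s then s :: pvAdj (some s) rest else pvAdj prev rest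

lemma foldl_adj (t : List String) : ∀ (out : List String) (prev : Option String),
    (t.foldl (fun p s => if p.2 ≠ some s then (p.1 ++ [s], some s) else p) (out, prev)).1
      = out ++ pvAdj prev t := by
  induction t with
  | nil => intro out prev; simp [pvAdj]
  | cons s rest ih =>
    intro out prev
    rw [List.foldl_cons]
    by_cases h : prev = some s
    · subst h
      rw [show (if ((out, some s) : List String × Option String).2 ≠ some s
            then ((out, some s).1 ++ [s], some s) else (out, some s)) = (out, some s) from
          if_neg (by simp)]
      rw [show pvAdj (some s) (s :: rest) = pvAdj (some s) rest by simp [pvAdj]]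
      exact ih out (some s)
    · rw [show (if ((out, prev) : List String × Option String).2 ≠ some s
            then ((out, prev).1 ++ [s], some s) else (out, prev)) = (out ++ [s], some s) from
          if_pos (by simpa using h)]
      rw [show pvAdj prev (s :: rest) = s :: pvAdj (some s) rest by
        simp [pvAdj]; intro hc; exact absurd hc h]
      rw [ih]
      simp

lemma adj_mem (t : List String) : ∀ (prev : Option String),
    t.Pairwise (· ≤ ·) → (∀ p, prev = some p → ∀ y ∈ t, p ≤ y) →
    ∀ x, x ∈ pvAdj prev t ↔ (x ∈ t ∧ prev ≠ some x) := by
  induction t with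
  | nil => intro prev _ _ x; simp [pvAdj]
  | cons s rest ih =>
    intro prev hp hlow x
    rcases List.pairwise_cons.mp hp with ⟨hsle, hrest⟩
    have hlow' : ∀ p, (some s : Option String) = some p → ∀ y ∈ rest, p ≤ y := by
      rintro p hp' y hy; cases Option.some.inj hp'; exact hsle y hy
    by_cases h : prev = some s
    · subst h
      rw [show pvAdj (some s) (s :: rest) = pvAdj (some s) rest by simp [pvAdj]]
      rw [ih (some s) hrest hlow' x]
      constructor
      · rintro ⟨hx, hne⟩
        exact ⟨List.mem_cons_of_mem _ hx, hne⟩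
      · rintro ⟨hx, hne⟩
        have hxs : x ≠ s := fun hc => hne (by rw [hc])
        rcases List.mem_cons.mp hx with h1 | h1
        · exact absurd h1 hxs
        · exact ⟨h1, hne⟩
    · rw [show pvAdj prev (s :: rest) = s :: pvAdj (some s) rest by
        simp [pvAdj]; intro hc; exact absurd hc h]
      rw [List.mem_cons, ih (some s) hrest hlow' x]
      constructor
      · rintro (h1 | ⟨h1, h2⟩)
        · subst h1; exact ⟨List.mem_cons_self, fun hc => h hc⟩
        · refine ⟨List.mem_cons_of_mem _ h1, ?_⟩
          intro hc
          have hx2 : x ≤ s := hlow x hc s List.mem_cons_self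
          have hx1 : s ≤ x := hsle x h1
          have : x = s := le_antisymm hx2 hx1
          exact h (by rw [← this, ← hc])
      · rintro ⟨hx, hne⟩
        rcases List.mem_cons.mp hx with h1 | h1
        · exact Or.inl h1
        · by_cases hxs : x = s
          · exact Or.inl hxs
          · exact Or.inr ⟨h1, fun hc => hxs (Option.some.inj hc).symm⟩

lemma adj_pairwise (t : List String) : ∀ (prev : Option String),
    t.Pairwise (· ≤ ·) → (pvAdj prev t).Pairwise (· < ·) := by
  induction t with
  | nil => intro prev _; simp [pvAdj]
  | cons s rest ih =>
    intro prev hp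
    rcases List.pairwise_cons.mp hp with ⟨hsle, hrest⟩
    have hlow' : ∀ p, (some s : Option String) = some p → ∀ y ∈ rest, p ≤ y := by
      rintro p hp' y hy; cases Option.some.inj hp'; exact hsle y hy
    by_cases h : prev = some s
    · rw [show pvAdj prev (s :: rest) = pvAdj (some s) rest by simp [pvAdj, h]]
      exact ih (some s) hrest
    · rw [show pvAdj prev (s :: rest) = s :: pvAdj (some s) rest by
        simp [pvAdj]; intro hc; exact absurd hc h]
      refine List.pairwise_cons.mpr ⟨?_, ih (some s) hrest⟩
      intro y hy
      rcases (adj_mem rest (some s) hrest hlow' y).mp hy with ⟨hy1, hy2⟩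
      exact lt_of_le_of_ne (hsle y hy1) (fun hc => hy2 (by rw [hc]))

-- ===== VERDICT (by name: the statement is the Claim_ definition above) =====
theorem unique_sources_py_spec : Claim_equal_unique_sources_py := by
  intro items _
  unfold Spec_unique_sources_py unique_sources_py unique_sources_py_alt
  rw [collectB_eq]
  set L := items.filterMap pvGuardA with hL
  set t := PySem.List.sorted L (fun x => x) false with ht
  have hts : t.Pairwise (· ≤ ·) := PySem.List.sorted_pairwise L (fun x => x)
  have hlow : ∀ p : String, (none : Option String) = some p → ∀ y ∈ t, p ≤ y := by
    intro p hp; cases hp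
  have hmem : ∀ x, x ∈ pvAdj none t ↔ x ∈ L := by
    intro x
    rw [adj_mem t none hts hlow x]
    simp [ht, PySem.List.mem_sorted]
  have hlt : (pvAdj none t).Pairwise (· < ·) := adj_pairwise t none hts
  have hnd : (pvAdj none t).Nodup := hlt.imp (fun h => ne_of_lt h)
  have hperm : (pvAdj none t).Perm (PySem.Set.ofList L) := by
    rw [List.perm_ext_iff_of_nodup hnd (PySem.Set.nodup_ofList L)]
    intro a
    rw [hmem a, PySem.Set.mem_ofList]
  rw [PySem.List.sorted_eq_of_perm_of_pairwise_lt (PySem.Set.ofList L) (pvAdj none t)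
    (fun x => x) hperm hlt]
  simpa using (foldl_adj t [] none).symm
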